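-- pv_equiv track=rewrite | github.com/vandijklab/cell2sentence | src/cell2sentence/utils.py | concat_vocabularies
-- ===== SOURCE A (Python) =====
-- from collections import OrderedDict, Counter
--
-- def concat_vocabularies(vocabulary_list):
--     """
--     Helper function to concatenate multiple vocabulary ordered dictionaries.
--     Preserves order of features in the first vocabulary, and appends any additional
--     features from successive dictionaries.
--     """
--     concat_vocab = OrderedDict()
--     for ordered_dict in vocabulary_list:
--         for key, val in ordered_dict.items():
--             if key not in concat_vocab:
--                 concat_vocab[key] = val
--             else:
--                 concat_vocab[key] = concat_vocab[key] + val
--     return concat_vocab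
-- ===== SOURCE B (Python) =====
-- from collections import OrderedDict
--
-- def concat_vocabularies(vocabulary_list):
--     """Two-pass rewrite: group every key's values in encounter order, then
--     reduce each group left-to-right with + (no initializer)."""
--     groups = OrderedDict()
--     for ordered_dict in vocabulary_list:
--         for key, val in ordered_dict.items():
--             groups.setdefault(key, []).append(val)
--     concat_vocab = OrderedDict()
--     for key, vals in groups.items():
--         total = vals[0]
--         for v in vals[1:]:
--             total = total + v
--         concat_vocab[key] = total
--     return concat_vocab
-- ===== Notes on version B (the rewrite author's own statement) =====
-- stated objective: alternative
-- what changed: Replaces A's single-pass merge (lookup-and-add into one dict) by a two-pass decomposition: first group every key's values into lists in first-encounter order, then reduce each group left-to-right with + (no initializer).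
import Mathlib
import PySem

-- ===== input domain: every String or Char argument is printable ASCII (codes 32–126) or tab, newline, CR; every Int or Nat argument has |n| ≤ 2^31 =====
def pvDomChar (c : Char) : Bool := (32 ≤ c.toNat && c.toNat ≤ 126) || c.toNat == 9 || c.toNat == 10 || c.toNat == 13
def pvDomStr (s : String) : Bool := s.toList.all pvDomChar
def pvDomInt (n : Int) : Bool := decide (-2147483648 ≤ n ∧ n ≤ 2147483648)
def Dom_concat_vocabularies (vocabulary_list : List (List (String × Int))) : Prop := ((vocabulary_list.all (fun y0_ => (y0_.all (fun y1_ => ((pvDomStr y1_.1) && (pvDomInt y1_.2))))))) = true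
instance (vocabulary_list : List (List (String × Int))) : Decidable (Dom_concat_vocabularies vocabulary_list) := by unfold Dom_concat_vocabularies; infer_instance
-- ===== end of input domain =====

-- B re-decomposes A's one-pass merge into group-values-per-key then reduce each group with +
-- (alternative decomposition, same order-preserving result; no speed claim).

-- ===== PORT A =====
-- literal transliteration of A: one dict, first assignment then add on repeat keys
def concat_vocabularies (vocabulary_list : List (List (String × Int))) : List (String × Int) :=
  (vocabulary_list.foldl
    (fun cv od => od.foldl
      (fun cv kv =>
        if cv.contains kv.1 then cv.insert kv.1 (cv.getD kv.1 0 + kv.2)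
        else cv.insert kv.1 kv.2)
      cv)
    PySem.Dict.empty).items

-- ===== PORT B =====
-- reduce without initializer over a nonempty group: total = vals[0]; for v in vals[1:]: total = total + v
-- ([] case is unreachable: every group built by B holds at least one value)
def pvReduceAdd (vals : List Int) : Int :=
  match vals with
  | [] => 0
  | v :: vs => vs.foldl (· + ·) v

-- first pass: groups.setdefault(key, []).append(val)  (= modify key [] (· ++ [val]))
def pvGroups (vocabulary_list : List (List (String × Int))) : PySem.Dict String (List Int) :=
  vocabulary_list.foldl
    (fun g od => od.foldl (fun g kv => g.modify kv.1 [] (· ++ [kv.2])) g)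
    PySem.Dict.empty

def concat_vocabularies_alt (vocabulary_list : List (List (String × Int))) : List (String × Int) :=
  -- second pass: concat_vocab[key] = reduce(+, vals)
  ((pvGroups vocabulary_list).items.foldl
    (fun cv kv => cv.insert kv.1 (pvReduceAdd kv.2))
    PySem.Dict.empty).items

-- ===== PRECONDITION & SPEC =====
def Spec_concat_vocabularies (vocabulary_list : List (List (String × Int))) (out : List (String × Int)) : Prop := out = concat_vocabularies_alt vocabulary_list
instance (vocabulary_list : List (List (String × Int))) (out : List (String × Int)) : Decidable (Spec_concat_vocabularies vocabulary_list out) := by unfold Spec_concat_vocabularies; infer_instance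

-- ===== CLAIM (what is proved, stated in full; the proofs are below) =====
def Claim_equal_concat_vocabularies : Prop := ∀ (vocabulary_list : List (List (String × Int))), Dom_concat_vocabularies vocabulary_list → Spec_concat_vocabularies vocabulary_list (concat_vocabularies vocabulary_list)

-- ===== LEMMAS AND PROOFS =====

-- A's merge step and B's grouping step, as functions on the flattened pair stream
def pvStepA (cv : PySem.Dict String Int) (kv : String × Int) : PySem.Dict String Int :=
  if cv.contains kv.1 then cv.insert kv.1 (cv.getD kv.1 0 + kv.2)
  else cv.insert kv.1 kv.2

def pvStepG (g : PySem.Dict String (List Int)) (kv : String × Int) : PySem.Dict String (List Int) :=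
  g.modify kv.1 [] (· ++ [kv.2])

-- the abstraction: reduce every group of the grouping dict
def pvMapD (g : PySem.Dict String (List Int)) : PySem.Dict String Int :=
  PySem.Dict.mk (g.items.map (fun p => (p.1, pvReduceAdd p.2)))

lemma pvMapD_items (g : PySem.Dict String (List Int)) :
    (pvMapD g).items = g.items.map (fun p => (p.1, pvReduceAdd p.2)) := rfl

lemma pvReduceAdd_append (vs : List Int) (v : Int) (h : vs ≠ []) :
    pvReduceAdd (vs ++ [v]) = pvReduceAdd vs + v := by
  cases vs with
  | nil => exact absurd rfl h
  | cons a l => simp [pvReduceAdd, List.foldl_append]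

lemma pvMapD_get? (g : PySem.Dict String (List Int)) (k : String) :
    (pvMapD g).get? k = (g.get? k).map pvReduceAdd := by
  simp [pvMapD, PySem.Dict.get?, List.find?_map, Function.comp_def]

lemma pvMapD_contains (g : PySem.Dict String (List Int)) (k : String) :
    (pvMapD g).contains k = g.contains k := by
  simp [pvMapD, PySem.Dict.contains, List.any_map, Function.comp_def]

-- the nested A-loop / B-grouping-loop over a list of dicts is the plain fold over the flattened pairs
lemma pv_foldl_nested {α : Type} (step : α → (String × Int) → α) :
    ∀ (vl : List (List (String × Int))) (init : α),
      vl.foldl (fun s od => od.foldl step s) init = (vl.flatMap id).foldl step init := by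
  intro vl
  induction vl with
  | nil => intro init; simp
  | cons od rest ih => intro init; simp [List.foldl_append, ih]

-- one step commutes with the abstraction (keys unique, groups nonempty)
lemma pv_step_comm (g : PySem.Dict String (List Int)) (kv : String × Int)
    (hnd : g.keys.Nodup) (hne : ∀ p ∈ g.items, p.2 ≠ []) :
    pvStepA (pvMapD g) kv = pvMapD (pvStepG g kv) := by
  obtain ⟨k, v⟩ := kv
  by_cases h : g.contains k = true
  · -- key already present: both sides rewrite the existing entry in place
    have hg : ∃ vs, g.get? k = some vs := by
      rcases hh : g.get? k with _ | vs
      · rw [PySem.Dict.contains_eq_isSome_get?, hh] at h; simp at h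
      · exact ⟨vs, rfl⟩
    obtain ⟨vs, hvs⟩ := hg
    have hmem : (k, vs) ∈ g.items := PySem.Dict.mem_items_of_get?_eq_some g hvs
    have hvs_ne : vs ≠ [] := hne _ hmem
    have hgetD : (pvMapD g).getD k 0 = pvReduceAdd vs := by
      simp [PySem.Dict.getD, pvMapD_get?, hvs]
    have hgetDg : g.getD k [] = vs := by simp [PySem.Dict.getD, hvs]
    have h2 : (pvMapD g).contains k = true := by rw [pvMapD_contains]; exact h
    simp only [pvStepA, pvStepG, PySem.Dict.modify]
    rw [if_pos h2]
    apply PySem.Dict.ext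
    rw [PySem.Dict.items_insert_of_contains _ _ h2, pvMapD_items, pvMapD_items,
        PySem.Dict.items_insert_of_contains _ _ h, List.map_map, List.map_map]
    apply List.map_congr_left
    intro p hp
    by_cases hpk : (p.1 == k) = true
    · have hpk' : p.1 = k := eq_of_beq hpk
      have hp2 : p.2 = vs := by
        have h1 := PySem.Dict.get?_of_mem_items g (k := p.1) (v := p.2) (by simpa using hp) hnd
        rw [hpk', hvs] at h1; exact (Option.some.inj h1).symm
      simp [hpk', hgetD, hgetDg, pvReduceAdd_append vs v hvs_ne]
    · have hne' : p.1 ≠ k := by simpa using hpk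
      simp [hne']
  · -- new key: both sides append
    have h' : g.contains k = false := by simpa using h
    have h2 : (pvMapD g).contains k = false := by rw [pvMapD_contains]; exact h'
    simp only [pvStepA, pvStepG, PySem.Dict.modify]
    rw [if_neg (by rw [h2]; simp)]
    apply PySem.Dict.ext
    rw [PySem.Dict.getD_of_not_contains g [] h',
        PySem.Dict.items_insert_of_not_contains _ _ h2, pvMapD_items, pvMapD_items,
        PySem.Dict.items_insert_of_not_contains _ _ h', List.map_append]
    simp [pvReduceAdd]

-- main invariant: folding A's step over the abstraction tracks folding B's grouping step,
-- and the grouping dict keeps unique keys and nonempty groups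
lemma pv_main (l : List (String × Int)) :
    ∀ (g : PySem.Dict String (List Int)), g.keys.Nodup → (∀ p ∈ g.items, p.2 ≠ []) →
      l.foldl pvStepA (pvMapD g) = pvMapD (l.foldl pvStepG g)
      ∧ (l.foldl pvStepG g).keys.Nodup
      ∧ (∀ p ∈ (l.foldl pvStepG g).items, p.2 ≠ []) := by
  induction l with
  | nil => intro g hnd hne; exact ⟨rfl, hnd, hne⟩
  | cons kv rest ih =>
    intro g hnd hne
    have hnd' : (pvStepG g kv).keys.Nodup := by
      simpa [pvStepG, PySem.Dict.modify] using
        PySem.Dict.nodup_keys_insert g kv.1 (g.getD kv.1 [] ++ [kv.2]) hnd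
    have hne' : ∀ p ∈ (pvStepG g kv).items, p.2 ≠ [] := by
      intro p hp
      rw [pvStepG, PySem.Dict.modify] at hp
      rcases (PySem.Dict.mem_items_insert _ _ _ _).mp hp with h | ⟨h, _⟩
      · subst h; simp
      · exact hne _ h
    have := ih (pvStepG g kv) hnd' hne'
    refine ⟨?_, this.2.1, this.2.2⟩
    simpa [List.foldl_cons, pv_step_comm g kv hnd hne] using this.1

theorem concat_vocabularies_equal (vl : List (List (String × Int))) :
    concat_vocabularies vl = concat_vocabularies_alt vl := by
  unfold concat_vocabularies concat_vocabularies_alt pvGroups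
  show (vl.foldl (fun cv od => od.foldl pvStepA cv) PySem.Dict.empty).items
      = ((vl.foldl (fun g od => od.foldl pvStepG g) PySem.Dict.empty).items.foldl
          (fun cv kv => cv.insert kv.1 (pvReduceAdd kv.2)) PySem.Dict.empty).items
  rw [pv_foldl_nested pvStepA, pv_foldl_nested pvStepG]
  have h0 := pv_main (vl.flatMap id) PySem.Dict.empty (by simp) (by simp [PySem.Dict.empty])
  have hA : (vl.flatMap id).foldl pvStepA PySem.Dict.empty
      = pvMapD ((vl.flatMap id).foldl pvStepG PySem.Dict.empty) := h0.1
  set G := (vl.flatMap id).foldl pvStepG PySem.Dict.empty with hG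
  rw [hA]
  have hfresh := PySem.Dict.items_foldl_insert_fresh G.items (fun kv => kv.1)
      (fun kv => pvReduceAdd kv.2) PySem.Dict.empty
      (fun a _ => by simp [PySem.Dict.contains, PySem.Dict.empty]) (by exact h0.2.1)
  rw [hfresh, pvMapD_items]
  simp [PySem.Dict.empty]

-- ===== VERDICT (by name: the statement is the Claim_ definition above) =====
theorem concat_vocabularies_spec : Claim_equal_concat_vocabularies := by
  intro vl _
  unfold Spec_concat_vocabularies
  exact concat_vocabularies_equal vl
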